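-- pv_equiv track=rewrite | github.com/Nikeliza/lab3-binar-image | main.py | get_sr_znach
-- ===== SOURCE A (Python) =====
-- def get_sr_znach(image):
--     new_mas_sr = [[0 for j in range(len(image[0]) // 2)] for i in range(len(image) // 2)]
--
--     for i in range(0, len(new_mas_sr)):
--         for j in range(0, len(new_mas_sr[0])):
--             new_mas_sr[i][j] = (image[i * 2][j * 2] + image[i * 2 + 1][j * 2] +
--                                 image[i * 2][j * 2 + 1] + image[i * 2 + 1][j * 2 + 1]) // 4
--     if len(image[0]) % 2 != 0:
--         n = len(image) // 2
--         for i in range(n):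
--             new_mas_sr[i].append((image[i * 2][-1] + image[i * 2 + 1][-1]) // 2)
--     if len(image) % 2 != 0:
--         n = len(image[0]) // 2
--         new_str_sr = []
--         for i in range(n):
--             new_str_sr.append((image[-1][i * 2] + image[-1][i * 2 + 1]) // 2)
--         new_mas_sr.append(new_str_sr)
--     if len(image) % 2 != 0 and len(image[0]) % 2 != 0:
--
--         new_mas_sr[-1].append(image[-1][-1])
--     return new_mas_sr
-- ===== SOURCE B (Python) =====
-- def get_sr_znach(image):
--     rows, cols = len(image), len(image[0])
--     out = []
--     for i in range((rows + 1) // 2):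
--         rs = [2 * i] if 2 * i + 1 >= rows else [2 * i, 2 * i + 1]
--         row = []
--         for j in range((cols + 1) // 2):
--             if 2 * j + 1 < cols:
--                 vals = [image[r][c] for r in rs for c in (2 * j, 2 * j + 1)]
--             else:
--                 vals = [image[r][-1] for r in rs]
--             row.append(sum(vals) // len(vals))
--         out.append(row)
--     return out
-- ===== Notes on version B (the rewrite author's own statement) =====
-- stated objective: simpler
-- what changed: Replaces A's four-phase construction (pre-filled zero matrix mutated by a nested loop, then three separate patch-up phases appending the odd column, the odd row and the corner) by a single uniform pass over the output grid that averages each clipped 2x2 block by its own pixel count.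
import Mathlib
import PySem

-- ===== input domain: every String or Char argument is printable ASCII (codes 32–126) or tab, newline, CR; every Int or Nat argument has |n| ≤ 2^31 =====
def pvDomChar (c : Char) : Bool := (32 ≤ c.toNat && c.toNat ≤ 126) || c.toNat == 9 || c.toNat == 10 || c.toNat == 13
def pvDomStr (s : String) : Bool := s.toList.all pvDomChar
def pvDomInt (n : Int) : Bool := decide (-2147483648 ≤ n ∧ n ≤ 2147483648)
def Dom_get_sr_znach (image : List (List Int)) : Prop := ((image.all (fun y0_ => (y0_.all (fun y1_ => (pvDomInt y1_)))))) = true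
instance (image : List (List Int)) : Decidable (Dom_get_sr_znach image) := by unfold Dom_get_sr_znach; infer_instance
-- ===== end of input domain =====

-- B rewrites A's four-phase fill-then-patch construction as one pass over the output
-- grid, averaging each clipped 2x2 block; objective: simpler (one uniform loop, no
-- zero-matrix pre-fill and no separate edge/corner patch phases).

-- ===== PORT A =====
-- shared indexing helper: image[r][c] under Python index semantics, totalised with
-- defaults ([] / 0) that Pre_ keeps unreachable
def gA (image : List (List Int)) (r c : Int) : Int :=
  (PySem.List.pyGet? ((PySem.List.pyGet? image r).getD []) c).getD 0

def get_sr_znach (image : List (List Int)) : List (List Int) :=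
  let c0 := ((PySem.List.pyGet? image 0).getD []).length
  let R := image.length / 2
  let C := c0 / 2
  -- new_mas_sr = [[0 …] …]
  let init := (List.range R).map (fun _ => (List.range C).map (fun _ => (0 : Int)))
  -- first double loop: in-place assignment ported as List.set
  let m1 := (List.range R).foldl (fun m i =>
      (List.range C).foldl (fun m j =>
        m.set i ((m.getD i []).set j
          (PySem.Int.floordiv
            (gA image (2*(i:Int)) (2*(j:Int)) + gA image (2*(i:Int)+1) (2*(j:Int)) +
             gA image (2*(i:Int)) (2*(j:Int)+1) + gA image (2*(i:Int)+1) (2*(j:Int)+1)) 4))) m) init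
  -- odd column count: append an averaged last column entry to each row
  let m2 := if c0 % 2 ≠ 0 then
      (List.range R).foldl (fun m i =>
        m.set i ((m.getD i []) ++
          [PySem.Int.floordiv (gA image (2*(i:Int)) (-1) + gA image (2*(i:Int)+1) (-1)) 2])) m1
    else m1
  -- odd row count: append an averaged last row
  let m3 := if image.length % 2 ≠ 0 then
      m2 ++ [(List.range C).map (fun (j : Nat) =>
        PySem.Int.floordiv (gA image (-1) (2*(j:Int)) + gA image (-1) (2*(j:Int)+1)) 2)]
    else m2
  -- both odd: the corner pixel
  if image.length % 2 ≠ 0 ∧ c0 % 2 ≠ 0 then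
    m3.set (m3.length - 1) ((m3.getD (m3.length - 1) []) ++ [gA image (-1) (-1)])
  else m3

-- ===== PORT B =====
def get_sr_znach_alt (image : List (List Int)) : List (List Int) :=
  let rows := image.length
  let cols := ((PySem.List.pyGet? image 0).getD []).length
  (List.range ((rows + 1) / 2)).map (fun i =>
    let rs : List Int := if 2*i+1 ≥ rows then [2*(i:Int)] else [2*(i:Int), 2*(i:Int)+1]
    (List.range ((cols + 1) / 2)).map (fun j =>
      let vals : List Int :=
        if 2*j+1 < cols then rs.flatMap (fun r => [gA image r (2*(j:Int)), gA image r (2*(j:Int)+1)])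
        else rs.map (fun r => gA image r (-1))
      PySem.Int.floordiv vals.sum (vals.length : Int)))

-- ===== PRECONDITION & SPEC =====
-- Pre_ is exactly where the Python A returns: a nonempty image whose every row is long
-- enough for the 2x2 sweep (≥ 2·(cols//2)) and, when the first row's length is odd,
-- nonempty (the row[-1] accesses); outside this A raises IndexError.
def Pre_get_sr_znach (image : List (List Int)) : Prop :=
  image ≠ [] ∧ ∀ row ∈ image,
    2 * ((image.headD []).length / 2) ≤ row.length ∧
    ((image.headD []).length % 2 = 1 → row ≠ [])
instance (image : List (List Int)) : Decidable (Pre_get_sr_znach image) := by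
  unfold Pre_get_sr_znach; infer_instance

def pvWitness_get_sr_znach : List (List Int) := [[1, 2], [3, 4]]

def Spec_get_sr_znach (image : List (List Int)) (out : List (List Int)) : Prop := out = get_sr_znach_alt image
instance (image : List (List Int)) (out : List (List Int)) : Decidable (Spec_get_sr_znach image out) := by unfold Spec_get_sr_znach; infer_instance

-- ===== CLAIM (what is proved, stated in full; the proofs are below) =====
def Claim_equal_get_sr_znach : Prop := ∀ (image : List (List Int)), Dom_get_sr_znach image → Pre_get_sr_znach image → Spec_get_sr_znach image (get_sr_znach image)


-- ===== LEMMAS AND PROOFS =====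

-- filling positions 0..k-1 of a row by repeated set
theorem fillRow (f : Nat → Int) (r0 : List Int) (k : Nat) (h : k ≤ r0.length) :
    (List.range k).foldl (fun r j => r.set j (f j)) r0 = (List.range k).map f ++ r0.drop k := by
  induction k with
  | zero => simp
  | succ k ih =>
    rw [List.range_succ, List.foldl_append, List.foldl_cons, List.foldl_nil,
      ih (by omega), List.map_append]
    have hk : k < r0.length := by omega
    rw [List.drop_eq_getElem_cons hk]
    have hlen : ((List.range k).map f).length = k := by simp
    rw [List.set_append, hlen]
    simp
    rw [List.drop_eq_getElem_cons hk, List.set_cons_zero]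

-- the inner loop only touches row i
theorem innerComm (m : List (List Int)) (i : Nat) (F : Nat → Int) (k : Nat) :
    (List.range k).foldl (fun m' j => m'.set i ((m'.getD i []).set j (F j))) m
      = m.set i ((List.range k).foldl (fun r j => r.set j (F j)) (m.getD i [])) := by
  by_cases hi : i < m.length
  · induction k with
    | zero =>
      simp only [List.range_zero, List.foldl_nil]
      rw [List.getD_eq_getElem?_getD, List.getElem?_eq_getElem hi]
      simp
    | succ k ih =>
      rw [List.range_succ, List.foldl_append, List.foldl_cons, List.foldl_nil, ih,
        List.set_set]
      congr 1
      rw [List.getD_eq_getElem?_getD, List.getElem?_set_eq_of_lt _ hi]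
      simp [List.foldl_append]
  · have hs : ∀ (a : List Int) (mm : List (List Int)), mm.length = m.length → mm.set i a = mm := by
      intro a mm hmm
      exact List.set_eq_of_length_le (by omega)
    have : ∀ k, (List.range k).foldl (fun m' j => m'.set i ((m'.getD i []).set j (F j))) m = m := by
      intro k
      induction k with
      | zero => simp
      | succ k ih2 =>
        rw [List.range_succ, List.foldl_append, List.foldl_cons, List.foldl_nil, ih2,
          hs _ _ rfl]
    rw [this k, hs _ _ rfl]

-- a loop rewriting row i from its own previous value, for i = 0..k-1
theorem getD_append_cons {α : Type} (l1 : List α) (x : α) (l2 : List α) (d : α) :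
    (l1 ++ x :: l2).getD l1.length d = x := by
  induction l1 with
  | nil => simp
  | cons y ys ih => simp [ih]

theorem outerFold (G : List Int → Nat → List Int) (m : List (List Int)) (k : Nat)
    (h : k ≤ m.length) :
    (List.range k).foldl (fun m' i => m'.set i (G (m'.getD i []) i)) m
      = (List.range k).map (fun i => G (m.getD i []) i) ++ m.drop k := by
  induction k with
  | zero => simp
  | succ k ih =>
    rw [List.range_succ, List.foldl_append, List.foldl_cons, List.foldl_nil,
      ih (by omega), List.map_append]
    have hk : k < m.length := by omega
    rw [List.drop_eq_getElem_cons hk]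
    have hlen : ((List.range k).map (fun i => G (m.getD i []) i)).length = k := by simp
    have hgd := getD_append_cons ((List.range k).map (fun i => G (m.getD i []) i)) (m[k])
      (m.drop (k + 1)) ([])
    rw [hlen] at hgd
    rw [hgd, List.set_append, hlen]
    simp
    rw [List.drop_eq_getElem_cons hk, List.set_cons_zero, List.getElem?_eq_getElem hk]
    rfl

theorem getD_map_range {β : Type} (f : Nat → β) (d : β) (R i : Nat) (h : i < R) :
    ((List.range R).map f).getD i d = f i := by
  simp [List.getD, h]

theorem set_append_length {α : Type} (l1 : List α) (a b : α) :
    (l1 ++ [a]).set l1.length b = l1 ++ [b] := by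
  induction l1 with
  | nil => simp
  | cons x xs ih => simp [ih]

theorem getD_append_length {α : Type} (l1 : List α) (a d : α) :
    (l1 ++ [a]).getD l1.length d = a := by
  simpa using getD_append_cons l1 a [] d

theorem fillMatrix (q : Nat → Nat → Int) (R C : Nat) :
    (List.range R).foldl (fun m i => (List.range C).foldl
        (fun m j => m.set i ((m.getD i []).set j (q i j))) m)
      ((List.range R).map (fun _ => (List.range C).map (fun _ => (0 : Int))))
    = (List.range R).map (fun i => (List.range C).map (fun j => q i j)) := by
  simp only [innerComm]
  rw [outerFold (fun row i => (List.range C).foldl (fun r j => r.set j (q i j)) row)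
    _ R (by simp)]
  rw [List.drop_eq_nil_of_le (by simp), List.append_nil]
  apply List.map_congr_left
  intro i hi
  rw [getD_map_range _ _ _ _ (List.mem_range.mp hi),
    fillRow _ _ C (by simp), List.drop_eq_nil_of_le (by simp), List.append_nil]

theorem appendCol (rows : Nat → List Int) (e : Nat → Int) (R : Nat) :
    (List.range R).foldl (fun m i => m.set i ((m.getD i []) ++ [e i]))
      ((List.range R).map rows)
    = (List.range R).map (fun i => rows i ++ [e i]) := by
  rw [outerFold (fun row i => row ++ [e i]) _ R (by simp)]
  rw [List.drop_eq_nil_of_le (by simp), List.append_nil]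
  apply List.map_congr_left
  intro i hi
  rw [getD_map_range _ _ _ _ (List.mem_range.mp hi)]

theorem fd_one (x : Int) : PySem.Int.floordiv x 1 = x := by
  rw [PySem.Int.floordiv_eq_ediv_of_pos (by norm_num)]
  exact Int.ediv_one x

theorem gA_neg_one_row (image : List (List Int)) (hodd : image.length % 2 = 1) (c : Int) :
    gA image (-1) c = gA image (2 * ((image.length / 2 : Nat) : Int)) c := by
  have h1 : (2 * ((image.length / 2 : Nat) : Int)) = ((image.length - 1 : Nat) : Int) := by
    push_cast; omega
  rw [h1]
  unfold gA
  rw [PySem.List.pyGet?_neg_one, PySem.List.pyGet?_natCast, List.getLast?_eq_getElem?]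

theorem main_eq (image : List (List Int)) :
    get_sr_znach image = get_sr_znach_alt image := by
  simp only [get_sr_znach, get_sr_znach_alt]
  set c0 := ((PySem.List.pyGet? image 0).getD []).length with hc0
  set n := image.length with hn
  set R := n / 2 with hR
  set C := c0 / 2 with hC
  rw [fillMatrix (fun i j =>
    (PySem.Int.floordiv
      (gA image (2*(i:Int)) (2*(j:Int)) + gA image (2*(i:Int)+1) (2*(j:Int)) +
       gA image (2*(i:Int)) (2*(j:Int)+1) + gA image (2*(i:Int)+1) (2*(j:Int)+1)) 4)) R C]
  have hneg : n % 2 = 1 → ∀ c : Int, gA image (-1) c = gA image (2 * ((R : Nat) : Int)) c := by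
    intro hodd c
    have := gA_neg_one_row image (by omega) c
    rw [← hn, ← hR] at this
    exact this
  rcases Nat.mod_two_eq_zero_or_one c0 with hc | hc <;>
    rcases Nat.mod_two_eq_zero_or_one n with hnp | hnp
  · -- both even
    rw [if_neg (show ¬(n % 2 ≠ 0 ∧ c0 % 2 ≠ 0) from by omega),
      if_neg (show ¬(n % 2 ≠ 0) from by omega), if_neg (show ¬(c0 % 2 ≠ 0) from by omega)]
    rw [show (n + 1) / 2 = R by omega]
    apply List.map_congr_left
    intro i hi
    have hi' := List.mem_range.mp hi
    rw [if_neg (by omega : ¬ 2 * i + 1 ≥ n), show (c0 + 1) / 2 = C by omega]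
    apply List.map_congr_left
    intro j hj
    have hj' := List.mem_range.mp hj
    rw [if_pos (by omega : 2 * j + 1 < c0)]
    simp only [List.flatMap_cons, List.flatMap_nil, List.map_cons, List.map_nil,
      List.append_nil, List.cons_append, List.nil_append, List.sum_cons, List.sum_nil,
      List.length_cons, List.length_nil, List.length_append]
    push_cast
    congr 1
    ring
  · -- c0 even, n odd
    rw [if_neg (show ¬(n % 2 ≠ 0 ∧ c0 % 2 ≠ 0) from by omega),
      if_pos (show n % 2 ≠ 0 from by omega), if_neg (show ¬(c0 % 2 ≠ 0) from by omega)]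
    rw [show (n + 1) / 2 = R + 1 by omega, List.range_succ, List.map_append]
    congr 1
    · apply List.map_congr_left
      intro i hi
      have hi' := List.mem_range.mp hi
      rw [if_neg (by omega : ¬ 2 * i + 1 ≥ n), show (c0 + 1) / 2 = C by omega]
      apply List.map_congr_left
      intro j hj
      have hj' := List.mem_range.mp hj
      rw [if_pos (by omega : 2 * j + 1 < c0)]
      simp only [List.flatMap_cons, List.flatMap_nil, List.map_cons, List.map_nil,
        List.append_nil, List.cons_append, List.nil_append, List.sum_cons, List.sum_nil,
        List.length_cons, List.length_nil, List.length_append]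
      push_cast
      congr 1
      ring
    · -- the appended last row
      simp only [List.map_cons, List.map_nil]
      congr 1
      rw [if_pos (by omega : 2 * R + 1 ≥ n), show (c0 + 1) / 2 = C by omega]
      apply List.map_congr_left
      intro j hj
      have hj' := List.mem_range.mp hj
      rw [if_pos (by omega : 2 * j + 1 < c0)]
      simp only [List.flatMap_cons, List.flatMap_nil, List.append_nil, List.cons_append,
        List.nil_append, List.sum_cons, List.sum_nil, List.length_cons, List.length_nil]
      rw [hneg hnp, hneg hnp]
      push_cast
      congr 1
      ring
  · -- c0 odd, n even
    rw [if_neg (show ¬(n % 2 ≠ 0 ∧ c0 % 2 ≠ 0) from by omega),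
      if_neg (show ¬(n % 2 ≠ 0) from by omega), if_pos (show c0 % 2 ≠ 0 from by omega)]
    rw [appendCol (fun (i : Nat) => (List.range C).map (fun (j : Nat) =>
        (PySem.Int.floordiv
          (gA image (2*(i:Int)) (2*(j:Int)) + gA image (2*(i:Int)+1) (2*(j:Int)) +
           gA image (2*(i:Int)) (2*(j:Int)+1) + gA image (2*(i:Int)+1) (2*(j:Int)+1)) 4)))
      (fun (i : Nat) => PySem.Int.floordiv (gA image (2*(i:Int)) (-1) + gA image (2*(i:Int)+1) (-1)) 2) R]
    rw [show (n + 1) / 2 = R by omega]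
    apply List.map_congr_left
    intro i hi
    have hi' := List.mem_range.mp hi
    rw [if_neg (by omega : ¬ 2 * i + 1 ≥ n), show (c0 + 1) / 2 = C + 1 by omega,
      List.range_succ, List.map_append]
    congr 1
    · apply List.map_congr_left
      intro j hj
      have hj' := List.mem_range.mp hj
      rw [if_pos (by omega : 2 * j + 1 < c0)]
      simp only [List.flatMap_cons, List.flatMap_nil, List.append_nil, List.cons_append,
        List.nil_append, List.sum_cons, List.sum_nil, List.length_cons, List.length_nil]
      push_cast
      congr 1
      ring
    · simp only [List.map_cons, List.map_nil]
      congr 1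
      rw [if_neg (by omega : ¬ 2 * C + 1 < c0)]
      simp only [List.map_cons, List.map_nil, List.sum_cons, List.sum_nil,
        List.length_cons, List.length_nil]
      push_cast
      congr 1
      ring
  · -- both odd
    rw [if_pos (show (n % 2 ≠ 0 ∧ c0 % 2 ≠ 0) from ⟨by omega, by omega⟩),
      if_pos (show n % 2 ≠ 0 from by omega), if_pos (show c0 % 2 ≠ 0 from by omega)]
    rw [appendCol (fun (i : Nat) => (List.range C).map (fun (j : Nat) =>
        (PySem.Int.floordiv
          (gA image (2*(i:Int)) (2*(j:Int)) + gA image (2*(i:Int)+1) (2*(j:Int)) +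
           gA image (2*(i:Int)) (2*(j:Int)+1) + gA image (2*(i:Int)+1) (2*(j:Int)+1)) 4)))
      (fun (i : Nat) => PySem.Int.floordiv (gA image (2*(i:Int)) (-1) + gA image (2*(i:Int)+1) (-1)) 2) R]
    have hL : ∀ (M2 : List (List Int)) (lr : List Int),
        (M2 ++ [lr]).set ((M2 ++ [lr]).length - 1)
          (((M2 ++ [lr]).getD ((M2 ++ [lr]).length - 1) []) ++ [gA image (-1) (-1)])
          = M2 ++ [lr ++ [gA image (-1) (-1)]] := by
      intro M2 lr
      have h1 : (M2 ++ [lr]).length - 1 = M2.length := by simp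
      rw [h1, getD_append_length, set_append_length]
    rw [hL]
    rw [show (n + 1) / 2 = R + 1 by omega, List.range_succ, List.map_append]
    congr 1
    · apply List.map_congr_left
      intro i hi
      have hi' := List.mem_range.mp hi
      rw [if_neg (by omega : ¬ 2 * i + 1 ≥ n), show (c0 + 1) / 2 = C + 1 by omega,
        List.range_succ, List.map_append]
      congr 1
      · apply List.map_congr_left
        intro j hj
        have hj' := List.mem_range.mp hj
        rw [if_pos (by omega : 2 * j + 1 < c0)]
        simp only [List.flatMap_cons, List.flatMap_nil, List.append_nil, List.cons_append,
          List.nil_append, List.sum_cons, List.sum_nil, List.length_cons, List.length_nil]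
        push_cast
        congr 1
        ring
      · simp only [List.map_cons, List.map_nil]
        congr 1
        rw [if_neg (by omega : ¬ 2 * C + 1 < c0)]
        simp only [List.map_cons, List.map_nil, List.sum_cons, List.sum_nil,
          List.length_cons, List.length_nil]
        push_cast
        congr 1
        ring
    · simp only [List.map_cons, List.map_nil]
      congr 1
      rw [if_pos (by omega : 2 * R + 1 ≥ n), show (c0 + 1) / 2 = C + 1 by omega,
        List.range_succ, List.map_append]
      congr 1
      · apply List.map_congr_left
        intro j hj
        have hj' := List.mem_range.mp hj
        rw [if_pos (by omega : 2 * j + 1 < c0)]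
        simp only [List.flatMap_cons, List.flatMap_nil, List.append_nil, List.cons_append,
          List.nil_append, List.sum_cons, List.sum_nil, List.length_cons, List.length_nil]
        rw [hneg hnp, hneg hnp]
        push_cast
        congr 1
        ring
      · simp only [List.map_cons, List.map_nil]
        congr 1
        rw [if_neg (by omega : ¬ 2 * C + 1 < c0)]
        simp only [List.map_cons, List.map_nil, List.sum_cons, List.sum_nil,
          List.length_cons, List.length_nil]
        rw [hneg hnp]
        push_cast
        simp [fd_one]

-- ===== VERDICT (by name: the statement is the Claim_ definition above) =====
theorem get_sr_znach_spec : Claim_equal_get_sr_znach := by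
  intro image _ _
  exact main_eq image
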